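-- pv_equiv track=rewrite | github.com/zachares/Grapher | data/preprocess_data.py | _aggregate_duplicates
-- ===== SOURCE A (Python) =====
-- from collections import defaultdict
-- from typing import Any, Dict, List, Tuple
--
-- def _aggregate_duplicates(
--     text_list: List[str],
--     serialized_graphs_list: List[List[str]]
-- ) -> Tuple[List[List[str]], List[List[str]]]:
--     """ Aggregates text which is paired with the same knowledge graph """
--     sequenced_graphs_list = ["".join(sorted(edges_str)) for edges_str in serialized_graphs_list]
--     graph2idx = defaultdict(list)
--     for idx, graph_str in enumerate(sequenced_graphs_list):
--         graph2idx[graph_str].append(idx)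
--     text_idxs, graph_idxs = [], []
--     for idxs in graph2idx.values():
--         text_idxs.append(idxs)
--         graph_idxs.append(idxs[0])
--     return (
--         [[text_list[idx] for idx in point_idxs] for point_idxs in text_idxs],
--         [serialized_graphs_list[idx] for idx in graph_idxs]
--     )
-- ===== SOURCE B (Python) =====
-- def _aggregate_duplicates(text_list, serialized_graphs_list):
--     """Group texts by canonical graph key: dedup keys in first-occurrence
--     order, then collect each group's indices with a direct scan."""
--     keys = ["".join(sorted(edges)) for edges in serialized_graphs_list]
--     uniq = []
--     for k in keys:
--         if k not in uniq:
--             uniq.append(k)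
--     texts_out, graphs_out = [], []
--     for k in uniq:
--         idxs = [i for i, kk in enumerate(keys) if kk == k]
--         texts_out.append([text_list[i] for i in idxs])
--         graphs_out.append(serialized_graphs_list[idxs[0]])
--     return texts_out, graphs_out
-- ===== Notes on version B (the rewrite author's own statement) =====
-- stated objective: simpler
-- what changed: Instead of building a key->index-list defaultdict in one loop and then remapping indices to texts and graphs in two later passes, B deduplicates the canonical-key list in first-occurrence order and emits each group directly with one scan per distinct key.
import Mathlib
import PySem

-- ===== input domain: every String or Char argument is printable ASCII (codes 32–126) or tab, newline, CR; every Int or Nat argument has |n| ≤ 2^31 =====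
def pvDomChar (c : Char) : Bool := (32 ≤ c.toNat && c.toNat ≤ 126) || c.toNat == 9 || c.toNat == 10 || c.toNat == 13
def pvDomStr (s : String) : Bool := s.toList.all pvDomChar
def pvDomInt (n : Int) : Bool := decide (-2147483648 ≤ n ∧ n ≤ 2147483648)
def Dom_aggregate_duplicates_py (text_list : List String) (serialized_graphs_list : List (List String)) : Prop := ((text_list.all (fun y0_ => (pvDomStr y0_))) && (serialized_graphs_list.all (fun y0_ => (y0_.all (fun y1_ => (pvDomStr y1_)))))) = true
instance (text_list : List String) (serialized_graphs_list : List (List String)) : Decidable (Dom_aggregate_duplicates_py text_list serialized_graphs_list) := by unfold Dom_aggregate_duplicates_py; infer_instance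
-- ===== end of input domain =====

-- B replaces A's dict-of-index-lists plus two remapping passes by a dedup of the key list
-- and one direct scan per distinct key (objective: simpler decomposition; not claimed faster).
-- ===== PORT A =====
-- Port of A: build graph_str -> index-list dict (defaultdict append), then remap.
def aggregate_duplicates_py (text_list : List String) (serialized_graphs_list : List (List String)) : List (List String) × List (List String) :=
  let sequenced_graphs_list := serialized_graphs_list.map (fun edges_str => PySem.Str.join "" (PySem.List.sorted edges_str (fun x => x) false))
  let graph2idx := (PySem.List.enumerate sequenced_graphs_list 0).foldl
    (fun d p => PySem.Dict.modify d p.2 [] (fun v => v ++ [p.1])) PySem.Dict.empty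
  let text_idxs := graph2idx.values
  let graph_idxs := text_idxs.map (fun idxs => idxs.headD 0)   -- idxs[0]: every value list is nonempty by construction
  ((text_idxs.map (fun point_idxs => point_idxs.map (fun idx => PySem.List.pyGetD text_list idx ""))),
   (graph_idxs.map (fun idx => PySem.List.pyGetD serialized_graphs_list idx [])))

-- ===== PORT B =====
-- Port of B: dedup the key list in first-occurrence order, then one direct scan per group.
def aggregate_duplicates_py_alt (text_list : List String) (serialized_graphs_list : List (List String)) : List (List String) × List (List String) :=
  let keys := serialized_graphs_list.map (fun edges => PySem.Str.join "" (PySem.List.sorted edges (fun x => x) false))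
  let uniq := keys.foldl (fun u k => if k ∈ u then u else u ++ [k]) []
  let pairs := uniq.map (fun k =>
    let idxs := ((PySem.List.enumerate keys 0).filter (fun p => p.2 == k)).map (fun p => p.1)
    (idxs.map (fun i => PySem.List.pyGetD text_list i ""),
     PySem.List.pyGetD serialized_graphs_list (idxs.headD 0) []))
  (pairs.map (fun pr => pr.1), pairs.map (fun pr => pr.2))

-- ===== PRECONDITION & SPEC =====
-- Pre_ excludes exactly the inputs where Python A raises IndexError: text_list[idx] with
-- idx an index into serialized_graphs_list, so A returns iff len(graphs) <= len(texts).
def Pre_aggregate_duplicates_py (text_list : List String) (serialized_graphs_list : List (List String)) : Prop :=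
  serialized_graphs_list.length ≤ text_list.length
instance (text_list : List String) (serialized_graphs_list : List (List String)) : Decidable (Pre_aggregate_duplicates_py text_list serialized_graphs_list) := by unfold Pre_aggregate_duplicates_py; infer_instance
def pvWitness_aggregate_duplicates_py : List String × List (List String) := (["t1", "t2"], [["b", "a"], ["ab"]])
def Spec_aggregate_duplicates_py (text_list : List String) (serialized_graphs_list : List (List String)) (out : List (List String) × List (List String)) : Prop := out = aggregate_duplicates_py_alt text_list serialized_graphs_list
instance (text_list : List String) (serialized_graphs_list : List (List String)) (out : List (List String) × List (List String)) : Decidable (Spec_aggregate_duplicates_py text_list serialized_graphs_list out) := by unfold Spec_aggregate_duplicates_py; infer_instance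

-- ===== CLAIM (what is proved, stated in full; the proofs are below) =====
def Claim_equal_aggregate_duplicates_py : Prop := ∀ (text_list : List String) (serialized_graphs_list : List (List String)), Dom_aggregate_duplicates_py text_list serialized_graphs_list → Pre_aggregate_duplicates_py text_list serialized_graphs_list → Spec_aggregate_duplicates_py text_list serialized_graphs_list (aggregate_duplicates_py text_list serialized_graphs_list)

-- ===== LEMMAS AND PROOFS =====

-- The dict built by A's grouping loop, characterized: its keys are the canonical keys
-- deduplicated in first-occurrence order, its value at k is the list of indices whose key is k.
lemma pvGetD_char (ks : List String) (k : String) :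
    ((PySem.List.enumerate ks 0).foldl (fun d p => PySem.Dict.modify d p.2 [] (fun v => v ++ [p.1])) PySem.Dict.empty).getD k []
    = ((PySem.List.enumerate ks 0).filter (fun p => p.2 == k)).map (fun p => p.1) := by
  rw [show (PySem.List.enumerate ks 0).foldl (fun d p => PySem.Dict.modify d p.2 [] (fun v => v ++ [p.1])) PySem.Dict.empty
      = ((PySem.List.enumerate ks 0).map (fun p => (p.2, p.1))).foldl (fun d q => PySem.Dict.modify d q.1 [] (fun v => v ++ [q.2])) PySem.Dict.empty
      from (List.foldl_map (f := fun p : Int × String => (p.2, p.1))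
        (g := fun d (q : String × Int) => PySem.Dict.modify d q.1 [] (fun v => v ++ [q.2]))).symm]
  rw [PySem.Dict.getD_foldl_modify_append]
  simp [List.filter_map, Function.comp_def]

lemma pvKeys_char (ks : List String) :
    ((PySem.List.enumerate ks 0).foldl (fun d p => PySem.Dict.modify d p.2 [] (fun v => v ++ [p.1])) PySem.Dict.empty).keys = PySem.Set.ofList ks := by
  rw [PySem.Dict.keys_foldl_modify_key (PySem.List.enumerate ks 0) (fun p => p.2) [] (fun _ p => (fun v => v ++ [p.1])) PySem.Dict.empty]
  simp [PySem.List.map_snd_enumerate, PySem.Set.update_nil_left]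

lemma pvValues_char (ks : List String) :
    ((PySem.List.enumerate ks 0).foldl (fun d p => PySem.Dict.modify d p.2 [] (fun v => v ++ [p.1])) PySem.Dict.empty).values
    = (PySem.Set.ofList ks).map (fun k => ((PySem.List.enumerate ks 0).filter (fun p => p.2 == k)).map (fun p => p.1)) := by
  have hnd := PySem.Dict.nodup_keys_foldl_modify_key (PySem.List.enumerate ks 0) (fun p => p.2) [] (fun _ p => (fun v => v ++ [p.1])) PySem.Dict.empty PySem.Dict.nodup_keys_empty
  rw [PySem.Dict.values_eq_map_keys _ hnd [], pvKeys_char]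
  exact List.map_congr_left (fun k _ => pvGetD_char ks k)

-- B's membership-test dedup loop is set(ks) in first-occurrence order.
lemma pvUniq_eq (ks : List String) :
    ks.foldl (fun u k => if k ∈ u then u else u ++ [k]) [] = PySem.Set.ofList ks := by
  rw [PySem.Set.ofList_eq_foldl]
  have h : (PySem.Set.add : PySem.Set String → String → PySem.Set String)
      = fun u k => if k ∈ u then u else u ++ [k] := by
    funext u k; rw [PySem.Set.add_eq_ite]
  rw [h]

-- ===== VERDICT (by name: the statement is the Claim_ definition above) =====
theorem aggregate_duplicates_py_spec : Claim_equal_aggregate_duplicates_py := by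
  intro text_list serialized_graphs_list _ _
  unfold Spec_aggregate_duplicates_py aggregate_duplicates_py aggregate_duplicates_py_alt
  simp only [pvValues_char, pvUniq_eq, List.map_map, Function.comp_def]
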